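-- pv_equiv track=rewrite | github.com/arbeitsgruppe-digitale-altnordistik/Sammlung-Toole | util/metadata.py | summarize_location
-- ===== SOURCE A (Python) =====
-- from typing import List, Optional, Tuple
--
-- def summarize_location(location: Tuple[str, str, str, str, str, str]) -> Tuple[str, str, str]:
--     """ Get manuscript location and summarize for usage in citavi
--
--     Args:
--         location (tuple): metadata of manuscript's location
--
--     Returns:
--         tuple: summary of metadata of manuscript's location
--     """
--
--     location_list = list(location)
--     for i in range(len(location_list)):
--         if not location_list[i]:
--             location_list[i] = ""
--             continue
--         location_list[i] = location_list[i] + ", "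
--     try:
--         settlement = location_list[1] + location_list[0]
--         settlement = settlement[:-2]
--
--     except:
--         settlement = "unknown"
--
--     try:
--         archive = location_list[2] + location_list[3] + location_list[4]
--         archive = archive[:-2]
--     except:
--         archive = "unknown"
--
--     signature = location_list[5]
--     signature = signature[:-2]
--
--     return settlement, archive, signature
-- ===== SOURCE B (Python) =====
-- def summarize_location(location):
--     """Same summary via filter-and-join: join the nonempty fields with ', '."""
--     def fmt(*fields):
--         return ", ".join(x for x in fields if x)
--     return (fmt(location[1], location[0]),
--             fmt(location[2], location[3], location[4]),
--             fmt(location[5]))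
-- ===== Notes on version B (the rewrite author's own statement) =====
-- stated objective: idiomatic
-- what changed: Replaces the mutate-list-append-separator-then-strip-[:-2] (with try/except) approach by directly joining the nonempty fields of each group with ', '.
import Mathlib
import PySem

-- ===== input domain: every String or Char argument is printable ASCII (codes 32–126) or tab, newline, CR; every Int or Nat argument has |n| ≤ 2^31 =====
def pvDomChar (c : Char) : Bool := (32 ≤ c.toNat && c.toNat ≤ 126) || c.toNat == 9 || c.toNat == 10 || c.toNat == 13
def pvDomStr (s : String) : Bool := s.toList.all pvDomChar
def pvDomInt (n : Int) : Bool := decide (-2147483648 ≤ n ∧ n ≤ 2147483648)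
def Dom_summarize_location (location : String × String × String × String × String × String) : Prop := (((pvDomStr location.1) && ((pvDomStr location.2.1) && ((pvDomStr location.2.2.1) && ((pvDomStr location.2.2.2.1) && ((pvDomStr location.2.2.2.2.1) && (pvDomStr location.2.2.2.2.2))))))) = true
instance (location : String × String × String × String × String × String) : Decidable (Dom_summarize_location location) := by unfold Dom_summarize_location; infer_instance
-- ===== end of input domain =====

-- ===== PORT A =====
-- B changes: builds each output by joining nonempty fields with ', ' instead of
-- appending separators to a list copy and stripping '[:-2]' (idiomatic rewrite).
-- fmtc: the loop body 'if not x: x = "" else: x = x + ", "' applied to one field (on code points)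
def fmtc (s : List Char) : List Char := if s = [] then [] else s ++ [',', ' ']

def summarize_location (location : String × String × String × String × String × String) : String × String × String :=
  -- location_list = list(location); the for-loop applies fmtc to every element
  let l0 := fmtc location.1.toList
  let l1 := fmtc location.2.1.toList
  let l2 := fmtc location.2.2.1.toList
  let l3 := fmtc location.2.2.2.1.toList
  let l4 := fmtc location.2.2.2.2.1.toList
  let l5 := fmtc location.2.2.2.2.2.toList
  -- the try/except bodies never raise on a 6-tuple of strings, so they are straight-line here
  let settlement := PySem.Chars.slice (l1 ++ l0) none (some (-2))
  let archive := PySem.Chars.slice (l2 ++ l3 ++ l4) none (some (-2))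
  let signature := PySem.Chars.slice l5 none (some (-2))
  (String.ofList settlement, String.ofList archive, String.ofList signature)

-- ===== PORT B =====
-- fmt(*fields) = ", ".join(x for x in fields if x)
def fmtJoin (fields : List (List Char)) : List Char :=
  PySem.Chars.join [',', ' '] (fields.filter (fun x => x ≠ []))

def summarize_location_alt (location : String × String × String × String × String × String) : String × String × String :=
  (String.ofList (fmtJoin [location.2.1.toList, location.1.toList]),
   String.ofList (fmtJoin [location.2.2.1.toList, location.2.2.2.1.toList, location.2.2.2.2.1.toList]),
   String.ofList (fmtJoin [location.2.2.2.2.2.toList]))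

-- ===== PRECONDITION & SPEC =====
def Spec_summarize_location (location : String × String × String × String × String × String) (out : String × String × String) : Prop := out = summarize_location_alt location
instance (location : String × String × String × String × String × String) (out : String × String × String) : Decidable (Spec_summarize_location location out) := by unfold Spec_summarize_location; infer_instance

-- ===== CLAIM (what is proved, stated in full; the proofs are below) =====
def Claim_equal_summarize_location : Prop := ∀ (location : String × String × String × String × String × String), Dom_summarize_location location → Spec_summarize_location location (summarize_location location)

-- ===== LEMMAS AND PROOFS =====

-- stripping the final ", " undoes one trailing separator
lemma cut2 (l : List Char) :
    PySem.List.slice (l ++ [',', ' ']) none (some (-2)) = l := by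
  rw [PySem.List.slice_to_neg_ofNat _ 2 (by omega)]
  simp

-- the concatenation of the formatted fields is the join of the nonempty ones plus one trailing separator
lemma flat_fmtc (xs : List (List Char)) :
    (xs.map fmtc).flatten =
      if xs.filter (fun x => x ≠ []) = [] then ([] : List Char)
      else PySem.Chars.join [',', ' '] (xs.filter (fun x => x ≠ [])) ++ [',', ' '] := by
  induction xs with
  | nil => rfl
  | cons a xs ih =>
    rw [List.map_cons, List.flatten_cons, List.filter_cons]
    by_cases ha : a = []
    · subst ha
      rw [show fmtc [] = [] from rfl, List.nil_append, ih]
      rfl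
    · have hin : (if decide (a ≠ []) = true then a :: xs.filter (fun x => x ≠ [])
          else xs.filter (fun x => x ≠ [])) = a :: xs.filter (fun x => x ≠ []) :=
        if_pos (by simpa using ha)
      rw [hin, if_neg (List.cons_ne_nil _ _),
        show fmtc a = a ++ [',', ' '] from if_neg ha]
      by_cases hf : xs.filter (fun x => x ≠ []) = []
      · rw [ih, if_pos hf, hf, PySem.Chars.join_singleton]
        simp
      · obtain ⟨y, r, hyr⟩ : ∃ y r, xs.filter (fun x => x ≠ []) = y :: r := by
          cases h : xs.filter (fun x => x ≠ []) with
          | nil => exact absurd h hf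
          | cons y r => exact ⟨y, r, rfl⟩
        rw [ih, if_neg hf, hyr, PySem.Chars.join_cons_cons]
        simp [List.append_assoc]

-- slicing off the trailing separator equals the join of the nonempty fields
lemma slice_flat (xs : List (List Char)) :
    PySem.Chars.slice ((xs.map fmtc).flatten) none (some (-2)) = fmtJoin xs := by
  rw [flat_fmtc]
  by_cases hf : xs.filter (fun x => x ≠ []) = []
  · rw [if_pos hf]
    unfold fmtJoin
    rw [hf]
    rfl
  · rw [if_neg hf]
    unfold fmtJoin
    rw [PySem.Chars.slice_eq_listSlice]
    exact cut2 _

-- ===== VERDICT (by name: the statement is the Claim_ definition above) =====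
theorem summarize_location_spec : Claim_equal_summarize_location := by
  intro location _
  unfold Spec_summarize_location summarize_location summarize_location_alt
  refine Prod.ext ?_ (Prod.ext ?_ ?_) <;> simp only []
  · have h := slice_flat [location.2.1.toList, location.1.toList]
    simp only [List.map_cons, List.map_nil, List.flatten_cons, List.flatten_nil,
      List.append_nil] at h
    rw [h]
  · have h := slice_flat [location.2.2.1.toList, location.2.2.2.1.toList, location.2.2.2.2.1.toList]
    simp only [List.map_cons, List.map_nil, List.flatten_cons, List.flatten_nil,
      List.append_nil, ← List.append_assoc] at h
    rw [h]
  · have h := slice_flat [location.2.2.2.2.2.toList]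
    simp only [List.map_cons, List.map_nil, List.flatten_cons, List.flatten_nil,
      List.append_nil] at h
    rw [h]
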